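-- pv_equiv track=rewrite | github.com/LilyTao0531/SRP_experiment | checker.py | enforce_feasible_tour
-- ===== SOURCE A (Python) =====
-- def enforce_feasible_tour(tour, dist_V_0N1):
--     V_0N1 = list(dist_V_0N1.keys())
--     check = True
--     for i in V_0N1:
--         if i not in tour:
--             check = False
--     if len(set(tour)) != len(tour):
--         check = False
--     return check
-- ===== SOURCE B (Python) =====
-- def enforce_feasible_tour(tour, dist_V_0N1):
--     required = set(dist_V_0N1.keys())
--     seen = set()
--     check = True
--     for x in tour:
--         if x in seen:
--             check = False
--         seen.add(x)
--         required.discard(x)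
--     if required:
--         check = False
--     return check
-- ===== Notes on version B (the rewrite author's own statement) =====
-- stated objective: faster
-- what changed: Single fused pass over the tour maintaining a seen-set and a shrinking required-key set, instead of scanning the whole tour once per key plus a separate set-size duplicate check.
import Mathlib
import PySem

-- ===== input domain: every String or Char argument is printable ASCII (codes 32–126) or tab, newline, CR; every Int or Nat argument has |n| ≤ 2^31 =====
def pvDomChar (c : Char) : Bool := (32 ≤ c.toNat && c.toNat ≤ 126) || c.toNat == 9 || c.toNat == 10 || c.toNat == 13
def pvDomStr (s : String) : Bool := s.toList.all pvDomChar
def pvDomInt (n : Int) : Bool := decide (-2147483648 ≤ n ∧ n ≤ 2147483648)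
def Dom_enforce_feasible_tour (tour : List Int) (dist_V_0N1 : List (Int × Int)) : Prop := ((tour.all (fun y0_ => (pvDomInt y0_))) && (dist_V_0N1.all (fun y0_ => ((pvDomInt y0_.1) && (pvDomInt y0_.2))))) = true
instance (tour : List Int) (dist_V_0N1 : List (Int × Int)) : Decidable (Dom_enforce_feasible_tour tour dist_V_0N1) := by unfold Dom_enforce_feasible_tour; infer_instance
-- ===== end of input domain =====

-- B fuses the per-key scans of the tour and the separate duplicate check into one pass over
-- the tour maintaining a seen-set and a shrinking required-key set (objective: faster).

-- ===== PORT A =====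
def enforce_feasible_tour (tour : List Int) (dist_V_0N1 : List (Int × Int)) : Bool :=
  let V_0N1 := (PySem.Dict.ofList dist_V_0N1).keys
  let check := V_0N1.foldl (fun c i => if tour.contains i = false then false else c) true
  let check := if (PySem.Set.ofList tour).length ≠ tour.length then false else check
  check

-- ===== PORT B =====
-- one loop-body step of Source B's pass over the tour: (seen, required, check) → updated state
def pvBStep (st : PySem.Set Int × PySem.Set Int × Bool) (x : Int) :
    PySem.Set Int × PySem.Set Int × Bool :=
  let check := if PySem.Set.contains st.1 x then false else st.2.2
  (PySem.Set.add st.1 x, PySem.Set.discard st.2.1 x, check)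

def enforce_feasible_tour_alt (tour : List Int) (dist_V_0N1 : List (Int × Int)) : Bool :=
  let required := PySem.Set.ofList ((PySem.Dict.ofList dist_V_0N1).keys)
  let st := tour.foldl pvBStep (PySem.Set.empty, required, true)
  if st.2.1.isEmpty then st.2.2 else false

-- ===== PRECONDITION & SPEC =====
def Spec_enforce_feasible_tour (tour : List Int) (dist_V_0N1 : List (Int × Int)) (out : Bool) : Prop := out = enforce_feasible_tour_alt tour dist_V_0N1
instance (tour : List Int) (dist_V_0N1 : List (Int × Int)) (out : Bool) : Decidable (Spec_enforce_feasible_tour tour dist_V_0N1 out) := by unfold Spec_enforce_feasible_tour; infer_instance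

-- ===== CLAIM (what is proved, stated in full; the proofs are below) =====
def Claim_equal_enforce_feasible_tour : Prop := ∀ (tour : List Int) (dist_V_0N1 : List (Int × Int)), Dom_enforce_feasible_tour tour dist_V_0N1 → Spec_enforce_feasible_tour tour dist_V_0N1 (enforce_feasible_tour tour dist_V_0N1)

-- ===== LEMMAS AND PROOFS =====

-- A's key loop is an 'all' check
theorem pvA_foldl (tour : List Int) (ks : List Int) (c : Bool) :
    ks.foldl (fun c i => if tour.contains i = false then false else c) c
      = (c && ks.all (fun i => tour.contains i)) := by
  induction ks generalizing c with
  | nil => simp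
  | cons k ks ih =>
      simp only [List.foldl_cons, List.all_cons, ih]
      cases hk : tour.contains k
      · simp
      · simp only [Bool.true_and]
        cases c <;> simp

-- PySem.Set.ofList never grows the list
theorem pv_len_ofList_le (xs : List Int) : (PySem.Set.ofList xs).length ≤ xs.length := by
  induction xs with
  | nil => simp [PySem.Set.ofList, PySem.Set.empty]
  | cons x xs ih =>
      rw [PySem.Set.ofList_cons]
      simp only [PySem.Set.discard, List.length_cons]
      have := List.length_filter_le (fun y => !y == x) (PySem.Set.ofList xs)
      omega

-- set(tour) has the same size as tour exactly when tour has no duplicates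
theorem pv_len_ofList_eq_iff (xs : List Int) :
    (PySem.Set.ofList xs).length = xs.length ↔ xs.Nodup := by
  induction xs with
  | nil => simp [PySem.Set.ofList, PySem.Set.empty]
  | cons x xs ih =>
      rw [PySem.Set.ofList_cons]
      by_cases hx : x ∈ xs
      · have hmem : x ∈ PySem.Set.ofList xs := (PySem.Set.mem_ofList _ _).2 hx
        have hlt : ((PySem.Set.ofList xs).filter (fun y => !y == x)).length
            < (PySem.Set.ofList xs).length := by
          apply List.length_filter_lt_length_iff_exists.2
          exact ⟨x, hmem, by simp⟩
        have hle := pv_len_ofList_le xs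
        simp only [PySem.Set.discard, List.length_cons, List.nodup_cons]
        constructor
        · intro h; omega
        · intro h; exact absurd hx h.1
      · have hfil : (PySem.Set.ofList xs).filter (fun y => !y == x) = PySem.Set.ofList xs := by
          apply List.filter_eq_self.2
          intro y hy
          have : y ∈ xs := (PySem.Set.mem_ofList _ _).1 hy
          simp only [Bool.not_eq_eq_eq_not, Bool.not_true, beq_eq_false_iff_ne]
          exact fun h => hx (h ▸ this)
        simp [PySem.Set.discard, hfil, hx, ih]

-- B's loop: the final check flag
theorem pvB_check (tour : List Int) (s r : PySem.Set Int) (c : Bool) :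
    (tour.foldl pvBStep (s, r, c)).2.2
      = (c && decide (tour.Nodup ∧ ∀ x ∈ tour, x ∉ s)) := by
  induction tour generalizing s r c with
  | nil => simp
  | cons x xs ih =>
      simp only [List.foldl_cons, pvBStep, ih]
      by_cases hx : x ∈ s
      · have : PySem.Set.contains s x = true := (PySem.Set.contains_iff s x).2 hx
        simp only [this, if_true]
        have hdec : decide ((x :: xs).Nodup ∧ ∀ y ∈ x :: xs, y ∉ s) = false :=
          decide_eq_false (by rintro ⟨-, h⟩; exact h x (by simp) hx)
        rw [hdec]; simp
      · have : PySem.Set.contains s x = false := by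
          by_contra h
          exact hx ((PySem.Set.contains_iff s x).1 (by simpa using h))
        simp only [this, if_neg, Bool.false_eq_true, not_false_eq_true]
        congr 1
        rw [decide_eq_decide]
        simp only [List.nodup_cons, List.mem_cons, PySem.Set.mem_add, not_or]
        constructor
        · rintro ⟨hnd, h⟩
          exact ⟨⟨fun hm => (h x hm).2 rfl, hnd⟩, by
            rintro y (rfl | hy); exact hx; exact (h y hy).1⟩
        · rintro ⟨⟨hxxs, hnd⟩, h⟩
          exact ⟨hnd, fun y hy => ⟨h y (Or.inr hy), fun hyx => hxxs (hyx ▸ hy)⟩⟩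

-- B's loop: membership in the final required set
theorem pvB_req (tour : List Int) (s r : PySem.Set Int) (c : Bool) (y : Int) :
    y ∈ (tour.foldl pvBStep (s, r, c)).2.1 ↔ y ∈ r ∧ y ∉ tour := by
  induction tour generalizing s r c with
  | nil => simp
  | cons x xs ih =>
      simp only [List.foldl_cons, pvBStep, ih, PySem.Set.mem_discard, List.mem_cons]
      constructor
      · rintro ⟨⟨hr, hne⟩, hnx⟩
        exact ⟨hr, by rintro (rfl | h); exact hne rfl; exact hnx h⟩
      · rintro ⟨hr, h⟩
        exact ⟨⟨hr, fun hyx => h (Or.inl hyx)⟩, fun hy => h (Or.inr hy)⟩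

-- ===== VERDICT (by name: the statement is the Claim_ definition above) =====
theorem enforce_feasible_tour_spec : Claim_equal_enforce_feasible_tour := by
  intro tour dist_V_0N1 _
  unfold Spec_enforce_feasible_tour enforce_feasible_tour enforce_feasible_tour_alt
  simp only [pvA_foldl, Bool.true_and, pvB_check]
  set ks := (PySem.Dict.ofList dist_V_0N1).keys with hks
  have hempty : ((tour.foldl pvBStep (PySem.Set.empty, PySem.Set.ofList ks, true)).2.1).isEmpty
      = decide (∀ k ∈ ks, k ∈ tour) := by
    rw [Bool.eq_iff_iff, List.isEmpty_iff, List.eq_nil_iff_forall_not_mem, decide_eq_true_iff]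
    constructor
    · intro h k hk
      by_contra hkt
      exact h k ((pvB_req tour _ _ _ k).2 ⟨(PySem.Set.mem_ofList _ _).2 hk, hkt⟩)
    · intro h y hy
      obtain ⟨hyr, hyt⟩ := (pvB_req tour _ _ _ y).1 hy
      exact hyt (h y ((PySem.Set.mem_ofList _ _).1 hyr))
  rw [hempty]
  have hall : (ks.all fun i => tour.contains i) = decide (∀ k ∈ ks, k ∈ tour) := by
    rw [Bool.eq_iff_iff]; simp [List.all_eq_true]
  rw [hall]
  by_cases hn : tour.Nodup
  · have hlen : (PySem.Set.ofList tour).length = tour.length := (pv_len_ofList_eq_iff tour).2 hn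
    simp [hlen, hn, PySem.Set.empty]
  · have hlen : (PySem.Set.ofList tour).length ≠ tour.length :=
      fun h => hn ((pv_len_ofList_eq_iff tour).1 h)
    simp [hlen, hn]
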